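-- pv_equiv track=rewrite | github.com/semalytix/LTTL | lexicon_processing/utils/lex_utils.py | matched_translations
-- ===== SOURCE A (Python) =====
-- from collections import Counter, defaultdict
--
-- def matched_translations(lexicon, corpus):
--     """
--     Creates a dictionary where the keys are the matches between the disambiguation corpus and lexicon and the values
--     are the frequency of the words in the corpus
--     :param lexicon: defaultdict
--     :param corpus: corpus object
--     :return: matches between lexicon and corpus according to frequency (Counter object)
--     """
--
--     matches = {}
--     corpus_word_frequency = Counter(corpus)
--     for word, freq in corpus_word_frequency.items():
--         for translation_candidates in lexicon.values():
--             if word in translation_candidates: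
--                 matches[word] = freq
--     return matches
-- ===== SOURCE B (Python) =====
-- def matched_translations(lexicon, corpus):
--     """
--     Single streaming pass: precompute the set of all lexicon candidate words,
--     then count matching corpus words incrementally (no Counter, no rescans).
--     """
--     lexicon_words = set()
--     for translation_candidates in lexicon.values():
--         lexicon_words.update(translation_candidates)
--     matches = {}
--     for word in corpus:
--         if word in lexicon_words:
--             matches[word] = matches.get(word, 0) + 1
--     return matches
-- ===== Notes on version B (the rewrite author's own statement) =====
-- stated objective: faster
-- what changed: B drops the Counter and the nested rescan of every lexicon value list entirely: it precomputes the union set of lexicon candidate words once and counts matching words in a single incremental pass over the corpus.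
import Mathlib
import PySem

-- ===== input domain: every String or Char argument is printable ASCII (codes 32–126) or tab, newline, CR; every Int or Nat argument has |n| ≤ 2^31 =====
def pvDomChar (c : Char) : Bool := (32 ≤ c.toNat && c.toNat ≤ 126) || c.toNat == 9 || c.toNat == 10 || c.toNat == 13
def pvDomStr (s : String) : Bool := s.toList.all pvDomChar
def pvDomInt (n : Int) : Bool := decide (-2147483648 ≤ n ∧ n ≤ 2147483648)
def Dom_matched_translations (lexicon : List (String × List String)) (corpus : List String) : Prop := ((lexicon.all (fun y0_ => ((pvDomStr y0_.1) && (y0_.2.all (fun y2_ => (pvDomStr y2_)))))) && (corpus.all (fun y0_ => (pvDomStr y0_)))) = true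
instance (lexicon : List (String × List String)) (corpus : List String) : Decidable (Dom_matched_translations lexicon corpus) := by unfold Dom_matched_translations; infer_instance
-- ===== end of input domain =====

-- B drops A's Counter and its per-word rescan of all lexicon value lists: it precomputes
-- the union set of lexicon words once and counts matches in one incremental corpus pass.

-- ===== PORT A =====
-- matches = {}; corpus_word_frequency = Counter(corpus)
-- for word, freq in corpus_word_frequency.items():
--   for translation_candidates in lexicon.values():
--     if word in translation_candidates: matches[word] = freq
def matched_translations (lexicon : List (String × List String)) (corpus : List String) : List (String × Int) :=
  (((PySem.Dict.counter corpus).items).foldl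
    (fun mtch wf =>
      lexicon.foldl
        (fun m kv => if wf.1 ∈ kv.2 then m.insert wf.1 wf.2 else m)
        mtch)
    PySem.Dict.empty).items

-- ===== PORT B =====
-- lexicon_words = set(); for translation_candidates in lexicon.values(): lexicon_words.update(translation_candidates)
-- matches = {}; for word in corpus:
--   if word in lexicon_words: matches[word] = matches.get(word, 0) + 1
def matched_translations_alt (lexicon : List (String × List String)) (corpus : List String) : List (String × Int) :=
  let lexiconWords : PySem.Set String :=
    lexicon.foldl (fun s kv => PySem.Set.update s kv.2) PySem.Set.empty
  (corpus.foldl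
    (fun mtchs word =>
      if word ∈ lexiconWords then mtchs.insert word (mtchs.getD word 0 + 1) else mtchs)
    PySem.Dict.empty).items

-- ===== PRECONDITION & SPEC =====
def Spec_matched_translations (lexicon : List (String × List String)) (corpus : List String) (out : List (String × Int)) : Prop := out = matched_translations_alt lexicon corpus
instance (lexicon : List (String × List String)) (corpus : List String) (out : List (String × Int)) : Decidable (Spec_matched_translations lexicon corpus out) := by unfold Spec_matched_translations; infer_instance

-- ===== CLAIM (what is proved, stated in full; the proofs are below) =====
def Claim_equal_matched_translations : Prop := ∀ (lexicon : List (String × List String)) (corpus : List String), Dom_matched_translations lexicon corpus → Spec_matched_translations lexicon corpus (matched_translations lexicon corpus)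

-- ===== LEMMAS AND PROOFS =====

-- Membership in B's accumulated union set = some lexicon value list contains the word.
theorem mem_foldl_update (lexicon : List (String × List String)) (s : PySem.Set String) (w : String) :
    w ∈ lexicon.foldl (fun s kv => PySem.Set.update s kv.2) s ↔ w ∈ s ∨ ∃ kv ∈ lexicon, w ∈ kv.2 := by
  induction lexicon generalizing s with
  | nil => simp
  | cons kv rest ih =>
    simp [List.foldl_cons, ih, PySem.Set.mem_update]
    tauto

-- A's inner loop over the lexicon either records the word once or leaves mtch alone.
theorem innerA (lexicon : List (String × List String)) (m : PySem.Dict String Int) (w : String) (f : Int) :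
    lexicon.foldl (fun m kv => if w ∈ kv.2 then m.insert w f else m) m
      = if ∃ kv ∈ lexicon, w ∈ kv.2 then m.insert w f else m := by
  induction lexicon generalizing m with
  | nil => simp
  | cons kv rest ih =>
    rw [List.foldl_cons]
    by_cases h : w ∈ kv.2
    · rw [if_pos h, ih]
      have hex : ∃ p ∈ kv :: rest, w ∈ p.2 := ⟨kv, List.mem_cons_self, h⟩
      rw [if_pos hex]
      by_cases h2 : ∃ p ∈ rest, w ∈ p.2
      · rw [if_pos h2, PySem.Dict.insert_insert_self]
      · rw [if_neg h2]
    · rw [if_neg h, ih]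
      have : (∃ p ∈ kv :: rest, w ∈ p.2) ↔ ∃ p ∈ rest, w ∈ p.2 := by
        constructor
        · rintro ⟨p, hp, hw⟩
          rcases List.mem_cons.mp hp with rfl | hp'
          · exact absurd hw h
          · exact ⟨p, hp', hw⟩
        · rintro ⟨p, hp, hw⟩; exact ⟨p, List.mem_cons_of_mem _ hp, hw⟩
      rw [if_congr this rfl rfl]

-- set(xs) commutes with filtering the underlying list.
theorem filter_foldl_add (l : List String) (p : String → Bool) (s : PySem.Set String)
    (hs : s.Nodup) :
    (l.foldl PySem.Set.add s).filter p = (l.filter p).foldl PySem.Set.add (s.filter p) := by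
  induction l generalizing s with
  | nil => simp
  | cons x t ih =>
    have hadd : (PySem.Set.add s x).filter p
        = if p x then PySem.Set.add (s.filter p) x else s.filter p := by
      by_cases hc : x ∈ s
      · have : PySem.Set.add s x = s := by
          simp [PySem.Set.add, PySem.Set.contains, hc]
        rw [this]
        by_cases hp : p x
        · have hmem : x ∈ s.filter p := List.mem_filter.mpr ⟨hc, hp⟩
          simp [hp, PySem.Set.add, PySem.Set.contains, hmem]
        · simp [hp]
      · have : PySem.Set.add s x = s ++ [x] := by
          simp [PySem.Set.add, PySem.Set.contains, hc]
        rw [this, List.filter_append]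
        by_cases hp : p x
        · have hnm : x ∉ s.filter p := fun hm => hc (List.mem_filter.mp hm).1
          simp [hp, PySem.Set.add, PySem.Set.contains, hnm]
        · simp [hp]
    rw [List.foldl_cons, ih _ (PySem.Set.nodup_add s x hs), hadd, List.filter_cons]
    by_cases hp : p x <;> simp [hp]

theorem ofList_filter (l : List String) (p : String → Bool) :
    PySem.Set.ofList (l.filter p) = (PySem.Set.ofList l).filter p := by
  rw [PySem.Set.ofList_eq_foldl, PySem.Set.ofList_eq_foldl,
    filter_foldl_add l p [] (by simp)]
  simp

-- ===== VERDICT (by name: the statement is the Claim_ definition above) =====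
theorem matched_translations_spec : Claim_equal_matched_translations := by
  intro lexicon corpus _
  show _ = _
  unfold matched_translations matched_translations_alt
  -- name the union set and predicates
  set lexSet := lexicon.foldl (fun s kv => PySem.Set.update s kv.2) PySem.Set.empty with hlex
  have hmemlex : ∀ w, w ∈ lexSet ↔ ∃ kv ∈ lexicon, w ∈ kv.2 := by
    intro w
    rw [hlex, mem_foldl_update]
    simp [PySem.Set.empty]
  -- A side: inner loop → conditional insert → filtered fresh-insert fold
  have hA : (((PySem.Dict.counter corpus).items).foldl
      (fun mtch wf =>
        lexicon.foldl (fun m kv => if wf.1 ∈ kv.2 then m.insert wf.1 wf.2 else m) mtch)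
      PySem.Dict.empty).items
      = ((PySem.Set.ofList corpus).filter (fun k => decide (k ∈ lexSet))).map
          (fun k => (k, (corpus.count k : Int))) := by
    have h1 : ∀ (m : PySem.Dict String Int) (wf : String × Int),
        lexicon.foldl (fun m kv => if wf.1 ∈ kv.2 then m.insert wf.1 wf.2 else m) m
          = if wf.1 ∈ lexSet then m.insert wf.1 wf.2 else m := by
      intro m wf
      rw [innerA, if_congr (hmemlex wf.1).symm rfl rfl]
    calc (((PySem.Dict.counter corpus).items).foldl
        (fun mtch wf =>
          lexicon.foldl (fun m kv => if wf.1 ∈ kv.2 then m.insert wf.1 wf.2 else m) mtch)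
        PySem.Dict.empty).items
        = (((PySem.Dict.counter corpus).items).foldl
            (fun mtch wf => if wf.1 ∈ lexSet then mtch.insert wf.1 wf.2 else mtch)
            PySem.Dict.empty).items := by
          exact congrArg PySem.Dict.items
            (PySem.List.foldl_congr_mem ((PySem.Dict.counter corpus).items)
              (fun mtch wf => lexicon.foldl
                (fun m kv => if wf.1 ∈ kv.2 then m.insert wf.1 wf.2 else m) mtch)
              (fun mtch wf => if wf.1 ∈ lexSet then mtch.insert wf.1 wf.2 else mtch)
              PySem.Dict.empty (fun m wf _ => h1 m wf))
      _ = ((((PySem.Dict.counter corpus).items).filter (fun wf => decide (wf.1 ∈ lexSet))).foldl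
            (fun mtch wf => mtch.insert wf.1 wf.2) PySem.Dict.empty).items := by
          exact congrArg PySem.Dict.items
            (PySem.List.foldl_ite_eq_foldl_filter (fun wf : String × Int => wf.1 ∈ lexSet)
              (fun (m : PySem.Dict String Int) (wf : String × Int) => m.insert wf.1 wf.2) _ _)
      _ = (((PySem.Dict.counter corpus).items).filter (fun wf => decide (wf.1 ∈ lexSet))) := by
          have hnodup : ((((PySem.Dict.counter corpus).items).filter
              (fun wf => decide (wf.1 ∈ lexSet))).map Prod.fst).Nodup := by
            have hsub : ((((PySem.Dict.counter corpus).items).filter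
                (fun wf => decide (wf.1 ∈ lexSet))).map Prod.fst).Sublist
                (((PySem.Dict.counter corpus).items).map Prod.fst) :=
              List.Sublist.map Prod.fst List.filter_sublist
            exact (PySem.Dict.nodup_keys_counter corpus).sublist hsub
          have hfresh := PySem.Dict.items_foldl_insert_fresh
            (((PySem.Dict.counter corpus).items).filter (fun wf => decide (wf.1 ∈ lexSet)))
            Prod.fst Prod.snd PySem.Dict.empty
            (fun a _ => PySem.Dict.contains_empty a.1) hnodup
          simpa using hfresh
      _ = ((PySem.Set.ofList corpus).filter (fun k => decide (k ∈ lexSet))).map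
            (fun k => (k, (corpus.count k : Int))) := by
          rw [PySem.Dict.items_counter, List.filter_map]
          rfl
  rw [hA]
  -- B side: conditional counting → counter of the filtered corpus
  have hB : (corpus.foldl
      (fun mtchs word => if word ∈ lexSet then mtchs.insert word (mtchs.getD word 0 + 1) else mtchs)
      PySem.Dict.empty).items
      = ((PySem.Set.ofList corpus).filter (fun k => decide (k ∈ lexSet))).map
          (fun k => (k, ((corpus.filter (fun w => decide (w ∈ lexSet))).count k : Int))) := by
    have hstep : corpus.foldl
        (fun (mtchs : PySem.Dict String Int) word =>
          if word ∈ lexSet then mtchs.insert word (mtchs.getD word 0 + 1) else mtchs)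
        PySem.Dict.empty
        = (corpus.filter (fun w => decide (w ∈ lexSet))).foldl
            (fun (m : PySem.Dict String Int) w => m.insert w (m.getD w 0 + 1))
            PySem.Dict.empty :=
      PySem.List.foldl_ite_eq_foldl_filter (fun w : String => w ∈ lexSet)
        (fun (m : PySem.Dict String Int) (w : String) => m.insert w (m.getD w 0 + 1))
        corpus PySem.Dict.empty
    rw [hstep, PySem.Dict.foldl_insert_getD_add_one_eq_counter, PySem.Dict.items_counter,
      ofList_filter]
  rw [hB]
  refine List.map_congr_left ?_
  intro k hk
  have hq : (corpus.filter (fun w => decide (w ∈ lexSet))).count k = corpus.count k :=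
    List.count_filter (List.mem_filter.mp hk).2
  rw [hq]
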